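-- pv_equiv track=rewrite | github.com/lunaticfoxy/TIL | Algorithm/codejam/2019/QR/DatBae.py | makeTestSet
-- ===== SOURCE A (Python) =====
-- def makeTestSet(works):
--     testSet = []
--     isOne = True
--
--     for i in range(len(works)):
--         if works[i]==-1:
--             if isOne:
--                 testSet.append(1)
--                 isOne = False
--             else:
--                 testSet.append(0)
--                 isOne = True
--         else:
--             testSet.append(0)
--
--     return testSet
-- ===== SOURCE B (Python) =====
-- def makeTestSet(works):
--     neg = [i for i, w in enumerate(works) if w == -1]
--     testSet = [0] * len(works)
--     for i in neg[::2]: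
--         testSet[i] = 1
--     return testSet
-- ===== Notes on version B (the rewrite author's own statement) =====
-- stated objective: alternative
-- what changed: Replaces the interleaved single pass with a boolean toggle by a collect-slice-scatter decomposition: gather the indices of -1 entries, keep every other one with [::2], and scatter 1s into a zero-filled list.
import Mathlib
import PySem

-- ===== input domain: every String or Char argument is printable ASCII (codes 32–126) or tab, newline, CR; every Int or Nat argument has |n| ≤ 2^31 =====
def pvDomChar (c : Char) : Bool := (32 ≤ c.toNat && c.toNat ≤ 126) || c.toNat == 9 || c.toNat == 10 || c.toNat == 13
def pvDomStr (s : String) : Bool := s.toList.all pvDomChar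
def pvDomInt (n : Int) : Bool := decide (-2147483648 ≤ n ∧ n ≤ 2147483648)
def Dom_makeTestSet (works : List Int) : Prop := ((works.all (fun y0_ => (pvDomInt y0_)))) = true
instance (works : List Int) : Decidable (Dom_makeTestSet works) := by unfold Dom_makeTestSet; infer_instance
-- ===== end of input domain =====

-- B rebuilds the answer by collect-slice-scatter instead of A's toggle pass; same value everywhere (objective: alternative).

-- ===== PORT A =====
-- one loop step of A: append 1/0 and flip the flag
def stepA (st : List Int × Bool) (w : Int) : List Int × Bool :=
  if w = -1 then
    (if st.2 then (st.1 ++ [1], false) else (st.1 ++ [0], true))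
  else (st.1 ++ [0], st.2)

def makeTestSet (works : List Int) : List Int :=
  ((PySem.List.pyRange 0 (works.length : Int) 1).foldl
      (fun st i => stepA st (PySem.List.pyGetD works i 0)) ([], true)).1

-- ===== PORT B =====
-- hand port of the step-2 slice neg[0::2] (exact: Python's [::2] keeps indices 0, 2, 4, …)
def evens : List Int → List Int
  | [] => []
  | [a] => [a]
  | a :: _ :: t => a :: evens t

def makeTestSet_alt (works : List Int) : List Int :=
  let neg := ((PySem.List.enumerate works 0).filter (fun p => p.2 == -1)).map (·.1)
  let ones := evens neg
  -- testSet[i] = 1; every i comes from enumerate, so 0 ≤ i < len(works) and .toNat is exact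
  ones.foldl (fun ts i => ts.set i.toNat 1) (List.replicate works.length 0)

-- ===== PRECONDITION & SPEC =====
def Spec_makeTestSet (works : List Int) (out : List Int) : Prop := out = makeTestSet_alt works
instance (works : List Int) (out : List Int) : Decidable (Spec_makeTestSet works out) := by unfold Spec_makeTestSet; infer_instance

-- ===== CLAIM (what is proved, stated in full; the proofs are below) =====
def Claim_equal_makeTestSet : Prop := ∀ (works : List Int), Dom_makeTestSet works → Spec_makeTestSet works (makeTestSet works)

-- ===== LEMMAS AND PROOFS =====

-- reference recursion = A's loop in cons form
def goA : List Int → Bool → List Int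
  | [], _ => []
  | w :: t, b =>
    if w = -1 then (if b then 1 :: goA t false else 0 :: goA t true)
    else 0 :: goA t b

-- the odd-position companion of evens
def odds : List Int → List Int
  | [] => []
  | _ :: t => evens t

theorem evens_cons (a : Int) (l : List Int) : evens (a :: l) = a :: odds l := by
  cases l <;> rfl

theorem evens_map_add (l : List Int) : evens (l.map (· + 1)) = (evens l).map (· + 1) := by
  induction l using evens.induct <;> simp_all [evens]

theorem odds_map_add (l : List Int) : odds (l.map (· + 1)) = (odds l).map (· + 1) := by
  cases l with
  | nil => rfl
  | cons a t => simp [odds, evens_map_add]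

theorem mem_evens {x : Int} (l : List Int) (h : x ∈ evens l) : x ∈ l := by
  induction l using evens.induct <;> simp_all [evens] <;> tauto

theorem mem_odds {x : Int} (l : List Int) (h : x ∈ odds l) : x ∈ l := by
  cases l with
  | nil => simp [odds] at h
  | cons a t => exact List.mem_cons_of_mem _ (mem_evens t h)

-- A's foldl with append accumulator = acc ++ goA
theorem foldA (ws : List Int) : ∀ (acc : List Int) (b : Bool),
    (ws.foldl stepA (acc, b)).1 = acc ++ goA ws b := by
  induction ws with
  | nil => intro acc b; simp [goA]
  | cons w t ih =>
    intro acc b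
    by_cases hw : w = -1
    · cases b <;> simp [goA, stepA, hw, ih]
    · simp [goA, stepA, hw, ih]

-- B's neg list, with general enumerate start
def negFrom (ws : List Int) (s : Int) : List Int :=
  ((PySem.List.enumerate ws s).filter (fun p => p.2 == -1)).map (·.1)

theorem enumerate_shift (ws : List Int) : ∀ s : Int,
    PySem.List.enumerate ws (s + 1) = (PySem.List.enumerate ws s).map (fun p => (p.1 + 1, p.2)) := by
  induction ws with
  | nil => intro s; simp [PySem.List.enumerate_nil]
  | cons w t ih =>
    intro s
    simp [PySem.List.enumerate_cons, ih (s + 1)]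

theorem negFrom_succ (ws : List Int) (s : Int) :
    negFrom ws (s + 1) = (negFrom ws s).map (· + 1) := by
  simp [negFrom, enumerate_shift, List.filter_map, List.map_map]
  rfl

theorem negFrom_cons (w : Int) (t : List Int) (s : Int) :
    negFrom (w :: t) s =
      if w = -1 then s :: (negFrom t s).map (· + 1) else (negFrom t s).map (· + 1) := by
  have h := negFrom_succ t s
  simp only [negFrom, PySem.List.enumerate_cons, List.filter_cons] at h ⊢
  by_cases hw : w = -1 <;> simp [hw, h]

theorem negFrom_nonneg (ws : List Int) : ∀ {x : Int}, x ∈ negFrom ws 0 → 0 ≤ x := by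
  induction ws with
  | nil => intro x hx; simp [negFrom, PySem.List.enumerate_nil] at hx
  | cons w t ih =>
    intro x hx
    rw [negFrom_cons] at hx
    by_cases hw : w = -1 <;> simp [hw] at hx
    · rcases hx with h0 | ⟨y, hy, rfl⟩
      · omega
      · have := ih hy; omega
    · rcases hx with ⟨y, hy, rfl⟩
      have := ih hy; omega

-- scatter over shifted indices peels the head cell
theorem scatter_shift (idxs : List Int) : ∀ (x : Int) (l : List Int),
    (∀ i ∈ idxs, 0 ≤ i) →
    (idxs.map (· + 1)).foldl (fun ts i => ts.set i.toNat 1) (x :: l) =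
      x :: idxs.foldl (fun ts i => ts.set i.toNat 1) l := by
  induction idxs with
  | nil => intro x l _; simp
  | cons i r ih =>
    intro x l h
    have hi : 0 ≤ i := h i (List.mem_cons_self ..)
    have : (i + 1).toNat = i.toNat + 1 := by omega
    simp only [List.map_cons, List.foldl_cons, this, List.set]
    exact ih x _ (fun j hj => h j (List.mem_cons_of_mem _ hj))

-- main invariant: A's cons recursion = B's scatter, for both flag values
theorem goA_eq_scatter (ws : List Int) :
    (goA ws true =
      (evens (negFrom ws 0)).foldl (fun ts i => ts.set i.toNat 1) (List.replicate ws.length 0)) ∧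
    (goA ws false =
      (odds (negFrom ws 0)).foldl (fun ts i => ts.set i.toNat 1) (List.replicate ws.length 0)) := by
  induction ws with
  | nil => simp [goA, negFrom, PySem.List.enumerate_nil, evens, odds]
  | cons w t ih =>
    obtain ⟨ihT, ihF⟩ := ih
    have hnn : ∀ i ∈ negFrom t 0, 0 ≤ i := fun i hi => negFrom_nonneg t hi
    have hnnE : ∀ i ∈ evens (negFrom t 0), 0 ≤ i := fun i hi => hnn i (mem_evens _ hi)
    have hnnO : ∀ i ∈ odds (negFrom t 0), 0 ≤ i := fun i hi => hnn i (mem_odds _ hi)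
    have hsE := scatter_shift (evens (negFrom t 0)) 0 (List.replicate t.length 0) hnnE
    have hsO := scatter_shift (odds (negFrom t 0)) 0 (List.replicate t.length 0) hnnO
    have hsO1 := scatter_shift (odds (negFrom t 0)) 1 (List.replicate t.length 0) hnnO
    by_cases hw : w = -1
    · subst hw
      constructor
      · -- flag true: head cell becomes 1, tail follows the false branch
        rw [show goA (-1 :: t) true = 1 :: goA t false from by simp [goA], negFrom_cons]
        simp only [List.length_cons, List.replicate_succ]
        norm_num [evens_cons, odds_map_add, hsO1, ihF]
      · rw [show goA (-1 :: t) false = 0 :: goA t true from by simp [goA], negFrom_cons]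
        simp only [List.length_cons, List.replicate_succ]
        norm_num [odds, evens_map_add, hsE, ihT]
    · constructor
      · rw [show goA (w :: t) true = 0 :: goA t true from by simp [goA, hw], negFrom_cons]
        simp only [List.length_cons, List.replicate_succ, if_neg hw]
        rw [evens_map_add, hsE, ihT]
      · rw [show goA (w :: t) false = 0 :: goA t false from by simp [goA, hw], negFrom_cons]
        simp only [List.length_cons, List.replicate_succ, if_neg hw]
        rw [odds_map_add, hsO, ihF]

-- ===== VERDICT (by name: the statement is the Claim_ definition above) =====
theorem makeTestSet_spec : Claim_equal_makeTestSet := by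
  intro works _
  unfold Spec_makeTestSet makeTestSet makeTestSet_alt
  rw [PySem.List.foldl_pyRange_zero_pyGetD' works 0 stepA ([], true)]
  rw [foldA works [] true]
  simpa [negFrom] using (goA_eq_scatter works).1
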